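-- pv_equiv track=rewrite | github.com/vaibhav-jain-dev/learning-algo | problems/200-must-solve/arrays/04-tournament-winner/similar/01-tournament-bracket/python_code.py | simulate_bracket_recursive
-- ===== SOURCE A (Python) =====
-- from typing import List
--
-- def simulate_bracket_recursive(teams: List[str], all_results: List[List[int]]) -> str:
--     """Helper for recursive bracket simulation."""
--     round_idx = 0
--
--     def advance_round(current_teams: List[str], r_idx: int) -> str:
--         if len(current_teams) == 1:
--             return current_teams[0]
--
--         winners = []
--         for i in range(0, len(current_teams), 2):
--             match_idx = i // 2
--             result = all_results[r_idx][match_idx]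
--             winner = current_teams[i] if result == 1 else current_teams[i + 1]
--             winners.append(winner)
--
--         return advance_round(winners, r_idx + 1)
--
--     return advance_round(teams, round_idx)
-- ===== SOURCE B (Python) =====
-- from typing import List
--
-- def simulate_bracket_recursive(teams: List[str], all_results: List[List[int]]) -> str:
--     """Iterative bracket simulation: fold each recorded round over the surviving teams."""
--     current = teams
--     for round_results in all_results:
--         if len(current) == 1:
--             break
--         current = [current[i] if round_results[i // 2] == 1 else current[i + 1]
--                    for i in range(0, len(current), 2)]
--     return current[0]
-- ===== Notes on version B (the rewrite author's own statement) =====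
-- stated objective: simpler
-- what changed: Replaces A's recursive helper (plus per-round append loop) by a single iterative fold: one for-loop over the recorded rounds that rebuilds the surviving-team list with a comprehension and breaks once one team remains.
import Mathlib
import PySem

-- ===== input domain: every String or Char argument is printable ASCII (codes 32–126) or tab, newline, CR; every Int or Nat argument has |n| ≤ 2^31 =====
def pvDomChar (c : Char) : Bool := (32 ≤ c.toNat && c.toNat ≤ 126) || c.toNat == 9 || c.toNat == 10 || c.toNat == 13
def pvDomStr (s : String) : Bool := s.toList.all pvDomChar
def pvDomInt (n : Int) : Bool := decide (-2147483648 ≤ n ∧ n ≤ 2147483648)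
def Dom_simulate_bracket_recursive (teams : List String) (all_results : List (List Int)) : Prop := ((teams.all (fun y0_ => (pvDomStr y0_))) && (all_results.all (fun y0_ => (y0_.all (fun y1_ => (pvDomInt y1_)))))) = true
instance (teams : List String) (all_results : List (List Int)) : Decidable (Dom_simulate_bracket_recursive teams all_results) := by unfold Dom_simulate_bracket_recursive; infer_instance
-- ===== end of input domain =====

-- B replaces A's recursive helper by a single fold of the recorded rounds over the surviving-team
-- list (objective: simpler/idiomatic; same asymptotic cost).

-- ===== PORT A =====
-- A's inner recursion `advance_round`; the fuel argument only makes the recursion structural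
-- (under Pre_ the list reaches length 1 before the fuel runs out, exactly as in Python).
def pvAdvanceRound (all_results : List (List Int)) : Nat → List String → Nat → String
  | 0, current, _ => current.headD ""
  | fuel+1, current, r_idx =>
    if current.length = 1 then current.headD ""
    else
      let winners := (PySem.List.pyRange 0 (current.length : Int) 2).foldl
        (fun ws i =>
          let match_idx := PySem.Int.floordiv i 2
          let result := (all_results.getD r_idx []).getD match_idx.toNat 0
          let winner := if result = 1 then current.getD i.toNat "" else current.getD (i+1).toNat ""
          ws ++ [winner]) []
      pvAdvanceRound all_results fuel winners (r_idx+1)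

def simulate_bracket_recursive (teams : List String) (all_results : List (List Int)) : String :=
  pvAdvanceRound all_results teams.length teams 0

-- ===== PORT B =====
-- one round of B's loop body (the list comprehension; the `if` is Python's early `break`,
-- equivalent because a length-1 list is left unchanged by every later round)
def pvBRound (current : List String) (round_results : List Int) : List String :=
  if current.length = 1 then current
  else (PySem.List.pyRange 0 (current.length : Int) 2).map
    (fun i => if round_results.getD (PySem.Int.floordiv i 2).toNat 0 = 1
              then current.getD i.toNat "" else current.getD (i+1).toNat "")

def simulate_bracket_recursive_alt (teams : List String) (all_results : List (List Int)) : String :=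
  (all_results.foldl pvBRound teams).headD ""

-- ===== PRECONDITION & SPEC =====
-- Exactly the inputs on which Python A returns: a non-empty team list, enough recorded rounds
-- (teams ≤ 2^rounds), and for every round that is actually played with ⌈n/2^r⌉ teams remaining,
-- that round's result row is long enough and, if the team count is odd, the lone unpaired team's
-- recorded result is 1 (otherwise A raises IndexError; an empty team list makes A recurse forever).
def Pre_simulate_bracket_recursive (teams : List String) (all_results : List (List Int)) : Prop :=
  1 ≤ teams.length ∧ teams.length ≤ 2 ^ all_results.length ∧
  ∀ r < all_results.length,
    1 < (teams.length + 2 ^ r - 1) / 2 ^ r →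
      ((teams.length + 2 ^ r - 1) / 2 ^ r + 1) / 2 ≤ (all_results.getD r []).length ∧
      ((teams.length + 2 ^ r - 1) / 2 ^ r % 2 = 1 →
        (all_results.getD r []).getD (((teams.length + 2 ^ r - 1) / 2 ^ r - 1) / 2) 0 = 1)
instance (teams : List String) (all_results : List (List Int)) : Decidable (Pre_simulate_bracket_recursive teams all_results) := by unfold Pre_simulate_bracket_recursive; infer_instance

def pvWitness_simulate_bracket_recursive : List String × List (List Int) := (["a", "b"], [[1]])

def Spec_simulate_bracket_recursive (teams : List String) (all_results : List (List Int)) (out : String) : Prop := out = simulate_bracket_recursive_alt teams all_results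
instance (teams : List String) (all_results : List (List Int)) (out : String) : Decidable (Spec_simulate_bracket_recursive teams all_results out) := by unfold Spec_simulate_bracket_recursive; infer_instance

-- ===== CLAIM (what is proved, stated in full; the proofs are below) =====
def Claim_equal_simulate_bracket_recursive : Prop := ∀ (teams : List String) (all_results : List (List Int)), Dom_simulate_bracket_recursive teams all_results → Pre_simulate_bracket_recursive teams all_results → Spec_simulate_bracket_recursive teams all_results (simulate_bracket_recursive teams all_results)

-- ===== LEMMAS AND PROOFS =====

lemma pv_foldl_append_map {α β : Type} (l : List α) (f : α → β) (init : List β) :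
    l.foldl (fun ws i => ws ++ [f i]) init = init ++ l.map f := by
  induction l generalizing init with
  | nil => simp
  | cons x xs ih => simp [List.foldl_cons, ih, List.append_assoc]

lemma pv_bfold_len_one (rows : List (List Int)) (cur : List String) (h : cur.length = 1) :
    rows.foldl pvBRound cur = cur := by
  induction rows with
  | nil => rfl
  | cons row rows ih => simp [List.foldl_cons, pvBRound, h, ih]

lemma pv_length_bRound (row : List Int) (cur : List String) (h : ¬ cur.length = 1) :
    (pvBRound cur row).length = (cur.length + 1) / 2 := by
  rw [pvBRound, if_neg h, List.length_map,
    PySem.List.pyRange_of_pos 0 (cur.length : Int) (by norm_num)]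
  simp only [List.length_map, List.length_range]
  split_ifs with hlt
  · omega
  · omega

lemma pv_adv_eq (ar : List (List Int)) (fuel : Nat) :
    ∀ (cur : List String) (r : Nat),
      1 ≤ cur.length → cur.length ≤ 2 ^ fuel → cur.length ≤ 2 ^ (ar.length - r) →
      pvAdvanceRound ar fuel cur r = ((ar.drop r).foldl pvBRound cur).headD "" := by
  induction fuel with
  | zero =>
    intro cur r h1 h2 _
    have hlen : cur.length = 1 := by simpa using Nat.le_antisymm h2 h1
    rw [pvAdvanceRound, pv_bfold_len_one _ _ hlen]
  | succ fuel ih =>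
    intro cur r h1 h2 h3
    by_cases hlen : cur.length = 1
    · rw [pvAdvanceRound, if_pos hlen, pv_bfold_len_one _ _ hlen]
    · have hn2 : 2 ≤ cur.length := by omega
      have hrlt : r < ar.length := by
        by_contra hge
        have : ar.length - r = 0 := by omega
        rw [this] at h3; simp at h3; omega
      have hw : (pvAdvanceRound ar (fuel+1) cur r) =
          pvAdvanceRound ar fuel (pvBRound cur (ar.getD r [])) (r+1) := by
        rw [pvAdvanceRound, if_neg hlen]
        rw [pv_foldl_append_map, List.nil_append, pvBRound, if_neg hlen]
      rw [hw]
      have hdrop : ar.drop r = ar[r] :: ar.drop (r+1) := (List.getElem_cons_drop hrlt).symm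
      have hgetD : ar.getD r [] = ar[r] := List.getD_eq_getElem ar [] hrlt
      rw [hdrop, List.foldl_cons, ← hgetD]
      have hlw : (pvBRound cur (ar.getD r [])).length = (cur.length + 1) / 2 :=
        pv_length_bRound _ _ hlen
      have hd : ar.length - r = (ar.length - (r+1)) + 1 := by omega
      have h2' : 2 ^ (fuel + 1) = 2 * 2 ^ fuel := by ring
      have h3' : 2 ^ (ar.length - r) = 2 * 2 ^ (ar.length - (r+1)) := by rw [hd]; ring
      exact ih (pvBRound cur (ar.getD r [])) (r+1)
        (by omega) (by rw [h2'] at h2; omega) (by rw [h3'] at h3; omega)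

-- ===== VERDICT (by name: the statement is the Claim_ definition above) =====
theorem simulate_bracket_recursive_spec : Claim_equal_simulate_bracket_recursive := by
  intro teams all_results _ hpre
  obtain ⟨h1, h2, _⟩ := hpre
  unfold Spec_simulate_bracket_recursive simulate_bracket_recursive simulate_bracket_recursive_alt
  rw [pv_adv_eq all_results teams.length teams 0 h1
    (le_of_lt (Nat.lt_two_pow_self)) (by simpa using h2)]
  simp
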